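-- pv_equiv track=rewrite | github.com/tolybay63/frontend-vue | Report-back-FAST-API/app/services/filter_service.py | _is_system_like_key
-- ===== SOURCE A (Python) =====
-- SYSTEM_FILTER_KEYS = {
--     "id",
--     "cls",
--     "obj",
--     "pv",
--     "fv",
--     "objUser",
--     "pvUser",
--     "fvUser",
--     "idUser",
--     "idCreatedAt",
--     "idUpdatedAt",
-- }
--
-- def _is_system_like_key(key: str) -> bool:
--     if key in SYSTEM_FILTER_KEYS:
--         return True
--     lowered = key.lower()
--     if lowered in SYSTEM_FILTER_KEYS:
--         return True
--     for prefix in ("id", "cls", "obj", "pv", "fv"):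
--         if lowered.startswith(prefix):
--             return True
--     return False
-- ===== SOURCE B (Python) =====
-- def _is_system_like_key(key: str) -> bool:
--     return key.lower().startswith(("id", "cls", "obj", "pv", "fv"))
-- ===== Notes on version B (the rewrite author's own statement) =====
-- stated objective: simpler
-- what changed: Drops the SYSTEM_FILTER_KEYS set and both membership tests (every key in the set lowercased starts with one of the five prefixes, so they are redundant) and returns a single combined startswith-tuple test on the lowered key.
import Mathlib
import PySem

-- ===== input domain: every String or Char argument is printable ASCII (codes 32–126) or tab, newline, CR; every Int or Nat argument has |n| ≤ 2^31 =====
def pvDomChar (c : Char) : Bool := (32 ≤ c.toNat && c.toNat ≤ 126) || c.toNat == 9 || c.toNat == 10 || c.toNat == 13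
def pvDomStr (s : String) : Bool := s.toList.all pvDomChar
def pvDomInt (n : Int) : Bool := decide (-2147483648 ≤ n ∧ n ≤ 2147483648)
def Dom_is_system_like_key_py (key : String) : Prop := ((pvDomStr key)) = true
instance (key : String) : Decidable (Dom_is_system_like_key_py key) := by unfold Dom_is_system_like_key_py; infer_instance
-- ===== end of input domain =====

-- B replaces the set and the two membership cascades by one combined prefix test on the lowered key (simpler; the set entries are redundant with the prefixes).


-- ===== PORT A =====
def pvSystemFilterKeys : PySem.Set String :=
  PySem.Set.ofList ["id", "cls", "obj", "pv", "fv", "objUser", "pvUser", "fvUser",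
    "idUser", "idCreatedAt", "idUpdatedAt"]

def is_system_like_key_py (key : String) : Bool :=
  if PySem.Set.contains pvSystemFilterKeys key then true
  else
    let lowered := PySem.Str.lower key
    if PySem.Set.contains pvSystemFilterKeys lowered then true
    else
      -- for-loop with early 'return True' over the five prefixes
      ["id", "cls", "obj", "pv", "fv"].any (fun prefix_ => PySem.Str.startswith lowered prefix_)

-- ===== PORT B =====
def is_system_like_key_py_alt (key : String) : Bool :=
  PySem.Str.startswith (PySem.Str.lower key) "id" ||
  PySem.Str.startswith (PySem.Str.lower key) "cls" ||
  PySem.Str.startswith (PySem.Str.lower key) "obj" ||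
  PySem.Str.startswith (PySem.Str.lower key) "pv" ||
  PySem.Str.startswith (PySem.Str.lower key) "fv"

-- ===== PRECONDITION & SPEC =====
def Spec_is_system_like_key_py (key : String) (out : Bool) : Prop := out = is_system_like_key_py_alt key
instance (key : String) (out : Bool) : Decidable (Spec_is_system_like_key_py key out) := by unfold Spec_is_system_like_key_py; infer_instance

-- ===== CLAIM (what is proved, stated in full; the proofs are below) =====
def Claim_equal_is_system_like_key_py : Prop := ∀ (key : String), Dom_is_system_like_key_py key → Spec_is_system_like_key_py key (is_system_like_key_py key)

-- ===== LEMMAS AND PROOFS =====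

-- Every literal in SYSTEM_FILTER_KEYS already starts (lowercased) with one of the prefixes,
-- so B returns true on each of them.
theorem alt_true_of_mem_keys (key : String) (h : key ∈ pvSystemFilterKeys) :
    is_system_like_key_py_alt key = true := by
  simp [pvSystemFilterKeys, PySem.Set.ofList] at h
  rcases h with h | h | h | h | h | h | h | h | h | h | h <;> subst h <;> decide

theorem lowerChar_idem (c : Char) :
    PySem.Chars.lowerChar (PySem.Chars.lowerChar c) = PySem.Chars.lowerChar c := by
  simp only [PySem.Chars.lowerChar, PySem.Chars.isupper]
  by_cases hc : 'A' ≤ c ∧ c ≤ 'Z'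
  · have hZ : c.toNat ≤ 90 := hc.2
    have hA : 65 ≤ c.toNat := hc.1
    have hofNat : (Char.ofNat (c.toNat + 32)).toNat = c.toNat + 32 := by
      unfold Char.ofNat
      have hv : (c.toNat + 32).isValidChar := Or.inl (by omega)
      rw [dif_pos hv, Char.toNat_ofNatAux]
    have hle : ¬ (Char.ofNat (c.toNat + 32) ≤ 'Z') := by
      intro h
      have h1 : (Char.ofNat (c.toNat + 32)).toNat ≤ ('Z' : Char).toNat := h
      have hZ90 : ('Z' : Char).toNat = 90 := rfl
      omega
    simp [hc.1, hc.2, hle]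
  · rw [not_and_or] at hc
    rcases hc with hc | hc <;> simp [hc]

theorem lower_idem (s : String) :
    PySem.Str.lower (PySem.Str.lower s) = PySem.Str.lower s := by
  simp [PySem.Str.lower, PySem.Chars.lower]
  induction s.toList with
  | nil => rfl
  | cons c cs ih =>
    simp only [List.map, Function.comp_apply, lowerChar_idem]
    have hcs : List.map (PySem.Chars.lowerChar ∘ PySem.Chars.lowerChar) cs
        = List.map PySem.Chars.lowerChar cs := by
      have := ih
      simpa using congrArg String.toList this
    rw [hcs]

theorem alt_true_of_lower_mem (key : String) (h : PySem.Str.lower key ∈ pvSystemFilterKeys) :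
    is_system_like_key_py_alt key = true := by
  have h' : is_system_like_key_py_alt (PySem.Str.lower key) = true := alt_true_of_mem_keys _ h
  rw [is_system_like_key_py_alt, lower_idem, ← is_system_like_key_py_alt] at h'
  exact h'

-- ===== VERDICT (by name: the statement is the Claim_ definition above) =====
theorem is_system_like_key_py_spec : Claim_equal_is_system_like_key_py := by
  intro key _
  unfold Spec_is_system_like_key_py
  unfold is_system_like_key_py
  by_cases h1 : PySem.Set.contains pvSystemFilterKeys key = true
  · rw [if_pos h1]
    exact (alt_true_of_mem_keys key (by simpa [PySem.Set.contains] using h1)).symm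
  · rw [if_neg h1]
    by_cases h2 : PySem.Set.contains pvSystemFilterKeys (PySem.Str.lower key) = true
    · simp only [h2, if_true]
      exact (alt_true_of_lower_mem key (by simpa [PySem.Set.contains] using h2)).symm
    · simp only [Bool.not_eq_true] at h2
      simp only [h2, Bool.false_eq_true, if_false, List.any,
        is_system_like_key_py_alt, Bool.or_assoc, Bool.or_false]
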